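-- pv_equiv track=rewrite | github.com/carloscabani/CarlosCabanilla | Day2/main.py | parte1
-- ===== SOURCE A (Python) =====
-- def parte1(lineas):
--
--
--     creciente = True
--     decreciente = True
--
--     for i in range(len(lineas)-1):
--         diferencia = abs(lineas[i]-lineas[i+1])
--
--         if diferencia < 1 or diferencia > 3:
--             creciente = False
--             decreciente = False
--             break
--
--         if lineas[i] >= lineas[i + 1]:
--             creciente = False
--
--
--         if lineas[i] <= lineas[i + 1]:
--             decreciente = False
--
--     return(creciente or decreciente)
-- ===== SOURCE B (Python) =====
-- def parte1(lineas):
--     # Determine the required direction from the first pair, then validate a single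
--     # signed step invariant 1 <= s*(b-a) <= 3, instead of tracking both directions.
--     if len(lineas) < 2:
--         return True
--     s = 1 if lineas[1] > lineas[0] else -1
--     for a, b in zip(lineas, lineas[1:]):
--         if not (1 <= s * (b - a) <= 3):
--             return False
--     return True
-- ===== Notes on version B (the rewrite author's own statement) =====
-- stated objective: alternative
-- what changed: Instead of scanning while tracking both 'increasing' and 'decreasing' flags, B infers the single required direction s from the first pair and then validates one signed step invariant 1 <= s*(b-a) <= 3 over the pairs, with early return on violation.
import Mathlib
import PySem

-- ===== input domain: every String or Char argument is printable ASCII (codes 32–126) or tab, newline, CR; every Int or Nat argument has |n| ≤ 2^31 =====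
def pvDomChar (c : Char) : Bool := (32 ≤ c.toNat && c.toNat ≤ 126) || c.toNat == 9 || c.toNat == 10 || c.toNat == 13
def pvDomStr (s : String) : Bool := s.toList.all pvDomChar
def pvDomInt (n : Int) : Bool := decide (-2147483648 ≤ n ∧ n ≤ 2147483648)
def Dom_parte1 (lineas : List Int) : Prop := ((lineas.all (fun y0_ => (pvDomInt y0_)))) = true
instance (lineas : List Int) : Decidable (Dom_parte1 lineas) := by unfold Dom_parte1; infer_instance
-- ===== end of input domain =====

-- B infers the single required direction from the first pair and checks one signed
-- step invariant, instead of A's dual-flag scan (alternative decomposition, same cost).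

-- ===== PORT A =====
-- the loop over `range(len(lineas)-1)`; indices i and i+1 are always in range, so pyGetD 0 is exact here
def parte1_go (lineas : List Int) : List Int → Bool → Bool → Bool
  | [], c, d => c || d
  | i :: rest, c, d =>
    let x := PySem.List.pyGetD lineas i 0
    let y := PySem.List.pyGetD lineas (i + 1) 0
    let diferencia := |x - y|
    if diferencia < 1 ∨ diferencia > 3 then
      -- creciente = False; decreciente = False; break → returns False ∨ False
      false
    else
      parte1_go lineas rest (if x ≥ y then false else c) (if x ≤ y then false else d)

def parte1 (lineas : List Int) : Bool :=
  parte1_go lineas (PySem.List.pyRange 0 ((lineas.length : Int) - 1) 1) true true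

-- ===== PORT B =====
-- the `for a, b in zip(...)` loop with its early `return False`
def parte1_alt_loop (s : Int) : List (Int × Int) → Bool
  | [] => true
  | (a, b) :: rest =>
    if ¬ (1 ≤ s * (b - a) ∧ s * (b - a) ≤ 3) then false
    else parte1_alt_loop s rest

def parte1_alt (lineas : List Int) : Bool :=
  if lineas.length < 2 then true
  else
    let s : Int := if PySem.List.pyGetD lineas 1 0 > PySem.List.pyGetD lineas 0 0 then 1 else -1
    parte1_alt_loop s (lineas.zip lineas.tail)

-- ===== PRECONDITION & SPEC =====
def Spec_parte1 (lineas : List Int) (out : Bool) : Prop := out = parte1_alt lineas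
instance (lineas : List Int) (out : Bool) : Decidable (Spec_parte1 lineas out) := by unfold Spec_parte1; infer_instance

-- ===== CLAIM (what is proved, stated in full; the proofs are below) =====
def Claim_equal_parte1 : Prop := ∀ (lineas : List Int), Dom_parte1 lineas → Spec_parte1 lineas (parte1 lineas)

-- ===== LEMMAS AND PROOFS =====

-- shifting the list and all (nonnegative) indices by one leaves A's loop unchanged
theorem pyGetD_shift (x : Int) (xs : List Int) (n : Nat) :
    PySem.List.pyGetD (x :: xs) ((n : Int) + 1) 0 = PySem.List.pyGetD xs (n : Int) 0 := by
  rw [show ((n : Int) + 1) = (((n + 1 : Nat)) : Int) by push_cast; ring,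
    PySem.List.pyGetD_natCast, PySem.List.pyGetD_natCast]
  simp

theorem parte1_go_shift (x : Int) (xs : List Int) :
    ∀ (idxs : List Int), (∀ i ∈ idxs, 0 ≤ i) → ∀ c d,
      parte1_go (x :: xs) (idxs.map (· + 1)) c d = parte1_go xs idxs c d := by
  intro idxs
  induction idxs with
  | nil => intro _ c d; rfl
  | cons i rest ih =>
    intro h c d
    have hi : 0 ≤ i := h i (by simp)
    obtain ⟨n, rfl⟩ := Int.eq_ofNat_of_zero_le hi
    have h1 : PySem.List.pyGetD (x :: xs) ((n : Int) + 1) 0 = PySem.List.pyGetD xs (n : Int) 0 :=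
      pyGetD_shift x xs n
    have h2 : PySem.List.pyGetD (x :: xs) ((n : Int) + 1 + 1) 0 = PySem.List.pyGetD xs ((n : Int) + 1) 0 := by
      rw [show ((n : Int) + 1) = (((n + 1 : Nat)) : Int) by push_cast; ring]
      exact pyGetD_shift x xs (n + 1)
    simp only [List.map_cons, parte1_go, h1, h2]
    split
    · rfl
    · exact ih (fun j hj => h j (by simp [hj])) _ _

theorem pyRange_shift (a b : Int) :
    PySem.List.pyRange (a + 1) (b + 1) 1 = (PySem.List.pyRange a b 1).map (· + 1) := by
  simp only [PySem.List.pyRange_one, List.map_map]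
  have : (b + 1 - (a + 1)) = b - a := by ring
  rw [this]
  apply List.map_congr_left
  intro k _
  simp; ring

-- characterisation of A: both-direction scan over the list of adjacent differences
theorem parte1_go_spec : ∀ (xs : List Int) (c d : Bool),
    parte1_go xs (PySem.List.pyRange 0 ((xs.length : Int) - 1) 1) c d =
      ((c && ((xs.zip xs.tail).map (fun p => p.2 - p.1)).all
          (fun v => decide (1 ≤ v) && decide (v ≤ 3))) ||
       (d && ((xs.zip xs.tail).map (fun p => p.2 - p.1)).all
          (fun v => decide (-3 ≤ v) && decide (v ≤ -1)))) := by
  intro xs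
  induction xs with
  | nil => intro c d; simp [parte1_go, PySem.List.pyRange_one_eq_nil]
  | cons x xs ih =>
    intro c d
    cases xs with
    | nil => simp [parte1_go, PySem.List.pyRange_one_eq_nil]
    | cons y t =>
      have hlen : ((x :: y :: t).length : Int) - 1 = ((y :: t).length : Int) - 1 + 1 := by
        simp only [List.length_cons]; push_cast; ring
      rw [hlen, PySem.List.pyRange_one_cons (by simp only [List.length_cons]; push_cast; omega)]
      have hsh : PySem.List.pyRange (0 + 1) (((y :: t).length : Int) - 1 + 1) 1 =
          (PySem.List.pyRange 0 (((y :: t).length : Int) - 1) 1).map (· + 1) :=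
        pyRange_shift 0 _
      simp only [parte1_go]
      have hx : PySem.List.pyGetD (x :: y :: t) 0 0 = x := by
        simp [PySem.List.pyGetD_zero_cons]
      have hy : PySem.List.pyGetD (x :: y :: t) (0 + 1) 0 = y := by
        have := pyGetD_shift x (y :: t) 0
        simpa using this
      rw [hx, hy, hsh]
      have hmem : ∀ i ∈ PySem.List.pyRange 0 (((y :: t).length : Int) - 1) 1, 0 ≤ i := by
        intro i hi
        exact (PySem.List.mem_pyRange_one.mp hi).1
      rw [parte1_go_shift x (y :: t) _ hmem, ih]
      simp only [List.zip_cons_cons, List.tail_cons, List.map_cons, List.all_cons]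
      generalize ((((y :: t).zip t).map (fun p => p.2 - p.1)).all
          (fun v => decide (1 ≤ v) && decide (v ≤ 3))) = A
      generalize ((((y :: t).zip t).map (fun p => p.2 - p.1)).all
          (fun v => decide (-3 ≤ v) && decide (v ≤ -1))) = B
      by_cases hbad : |x - y| < 1 ∨ |x - y| > 3
      · rw [if_pos hbad]
        have h1 : ¬ (1 ≤ y - x) ∨ ¬ (y - x ≤ 3) := by
          rcases abs_cases (x - y) with ⟨he, _⟩ | ⟨he, _⟩ <;> omega
        have h2 : ¬ (-3 ≤ y - x) ∨ ¬ (y - x ≤ -1) := by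
          rcases abs_cases (x - y) with ⟨he, _⟩ | ⟨he, _⟩ <;> omega
        rcases h1 with h1 | h1 <;> rcases h2 with h2 | h2 <;> simp [h1, h2]
      · rw [if_neg hbad]
        have habs : 1 ≤ |x - y| ∧ |x - y| ≤ 3 := ⟨by omega, by omega⟩
        rcases abs_cases (x - y) with ⟨he, _⟩ | ⟨he, _⟩
        · have hgt : y < x := by omega
          have hge : x ≥ y := le_of_lt hgt
          have hle : ¬ x ≤ y := not_le.mpr hgt
          have hd1 : -3 ≤ y - x := by omega
          have hd2 : y - x ≤ -1 := by omega
          have hi1 : ¬ (1 ≤ y - x) := by omega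
          simp [hge, hle, hd1, hd2, hi1]
        · have hlt : x < y := by omega
          have hle : x ≤ y := le_of_lt hlt
          have hge : ¬ x ≥ y := not_le.mpr hlt
          have hi1 : 1 ≤ y - x := by omega
          have hi2 : y - x ≤ 3 := by omega
          have hd2 : ¬ (y - x ≤ -1) := by omega
          simp [hge, hle, hi1, hi2, hd2]

-- characterisation of B's loop: a signed all-scan over the adjacent differences
theorem parte1_alt_loop_spec (s : Int) : ∀ (ps : List (Int × Int)),
    parte1_alt_loop s ps =
      (ps.map (fun p => p.2 - p.1)).all (fun v => decide (1 ≤ s * v) && decide (s * v ≤ 3)) := by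
  intro ps
  induction ps with
  | nil => rfl
  | cons p rest ih =>
    obtain ⟨a, b⟩ := p
    simp only [parte1_alt_loop, List.map_cons, List.all_cons, ih]
    by_cases h : 1 ≤ s * (b - a) ∧ s * (b - a) ≤ 3
    · simp [h]
    · rw [if_pos h]
      rcases not_and_or.mp h with h1 | h1 <;> simp [h1]

theorem all_neg_sign (l : List Int) :
    l.all (fun v => decide (1 ≤ (-1 : Int) * v) && decide ((-1 : Int) * v ≤ 3)) =
      l.all (fun v => decide (-3 ≤ v) && decide (v ≤ -1)) := by
  induction l with
  | nil => rfl
  | cons v t ih =>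
    simp only [List.all_cons, ih]
    congr 1
    rw [decide_eq_decide.mpr (show (1 ≤ (-1:Int) * v) ↔ (v ≤ -1) by omega),
      decide_eq_decide.mpr (show ((-1:Int) * v ≤ 3) ↔ (-3 ≤ v) by omega)]
    exact Bool.and_comm _ _

-- ===== VERDICT (by name: the statement is the Claim_ definition above) =====
theorem parte1_spec : Claim_equal_parte1 := by
  intro lineas _
  unfold Spec_parte1 parte1 parte1_alt
  rw [parte1_go_spec]
  cases lineas with
  | nil => simp
  | cons x xs =>
    cases xs with
    | nil => simp
    | cons y t =>
      rw [if_neg (by simp)]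
      have hx : PySem.List.pyGetD (x :: y :: t) 0 0 = x := by
        simp [PySem.List.pyGetD_zero_cons]
      have hy : PySem.List.pyGetD (x :: y :: t) 1 0 = y := by
        have := pyGetD_shift x (y :: t) 0
        simpa using this
      rw [hx, hy, parte1_alt_loop_spec]
      by_cases hgt : y > x
      · rw [if_pos hgt]
        simp only [one_mul, Bool.true_and]
        -- the decreasing scan fails at the first pair since y - x ≥ 1
        simp only [List.zip_cons_cons, List.tail_cons, List.map_cons, List.all_cons]
        have h1 : ¬ ((y - x : Int) ≤ -1) := by omega
        simp [h1]
      · rw [if_neg hgt]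
        rw [all_neg_sign]
        -- the increasing scan fails at the first pair since y - x ≤ 0
        simp only [List.zip_cons_cons, List.tail_cons, List.map_cons, List.all_cons]
        have h1 : ¬ ((1:Int) ≤ y - x) := by omega
        simp [h1]
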